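-- pv_equiv track=rewrite | github.com/libertypi/regen | regen.py | _filter_affix
-- ===== SOURCE A (Python) =====
-- from typing import (
--     Dict,
--     FrozenSet,
--     Iterable,
--     Iterator,
--     List,
--     Optional,
--     Set,
--     Tuple,
--     Union,
-- )
--
-- Token = Tuple[str]
--
-- def _filter_affix(
--     d: Dict[Token, Set[Token]], intersect: Set[Token] = None
-- ) -> Dict[Token, Set[Token]]:
--     """Keep groups which divide the same words at max common subsequence,
--     and remove single member groups.
--
--     - Example: (AB: ABC, ABD), (A: ABC, ABD), (ABC: ABC): only the first
--         item will be keeped.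
--     """
--     if intersect is None:
--         stream = d.items()
--     else:
--         stream = _intersect_affix(d, intersect)
--
--     tmp = {}
--     setdefault = tmp.setdefault
--     for k, v in stream:
--         if len(v) > 1:
--             key = frozenset(v)
--             val = len(k), k
--             if setdefault(key, val) < val:
--                 tmp[key] = val
--
--     return {k: d[k] for _, k in tmp.values()}
--
-- def _intersect_affix(
--     d: Dict[Token, Set[Token]], r: Set[Token]
-- ) -> Iterator[Tuple[Token, Set[Token]]]:
--     for i in d.items():
--         i[1].intersection_update(r)
--         yield i
-- ===== SOURCE B (Python) =====
-- def _filter_affix(d, intersect=None):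
--     """Dedup-by-first-occurrence with nested scans instead of a
--     frozenset-keyed dict with a running max: pop the first remaining group,
--     find its best key by one scan of the remainder, filter that group's
--     duplicates out and continue.  Same in-place intersection_update mutation
--     of d's values."""
--     if intersect is not None:
--         for v in d.values():
--             v.intersection_update(intersect)
--     rest = [(k, frozenset(v)) for k, v in d.items() if len(v) > 1]
--     result = {}
--     while rest:
--         k, v = rest[0]
--         rest = rest[1:]
--         best = k
--         for k2, w in rest:
--             if w == v and (len(best), best) < (len(k2), k2):
--                 best = k2
--         result[best] = d[best]
--         rest = [item for item in rest if item[1] != v]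
--     return result
-- ===== Notes on version B (the rewrite author's own statement) =====
-- stated objective: alternative
-- what changed: B drops A's frozenset-keyed dict with a running (len,key) maximum entirely: it recursively takes the first remaining group, finds its best key by one scan of the remainder, filters that group's duplicates out and recurses (nested scans, no grouping dict).
import Mathlib
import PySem

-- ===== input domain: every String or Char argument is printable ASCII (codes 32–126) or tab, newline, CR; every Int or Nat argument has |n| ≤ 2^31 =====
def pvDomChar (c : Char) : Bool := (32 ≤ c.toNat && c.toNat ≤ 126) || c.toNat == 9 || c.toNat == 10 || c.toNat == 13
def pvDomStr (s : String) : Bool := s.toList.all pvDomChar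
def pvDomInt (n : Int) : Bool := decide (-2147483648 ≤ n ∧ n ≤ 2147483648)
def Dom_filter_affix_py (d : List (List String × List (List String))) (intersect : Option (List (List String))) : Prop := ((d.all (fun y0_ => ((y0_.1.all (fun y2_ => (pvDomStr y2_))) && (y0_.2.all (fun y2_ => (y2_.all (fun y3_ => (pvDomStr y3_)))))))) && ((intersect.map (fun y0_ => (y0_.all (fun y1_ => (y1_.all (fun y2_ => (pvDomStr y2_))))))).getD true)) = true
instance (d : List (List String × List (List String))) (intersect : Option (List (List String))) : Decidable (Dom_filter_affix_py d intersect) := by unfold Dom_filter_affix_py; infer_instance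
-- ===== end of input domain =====

-- B replaces A's frozenset-keyed dict with running (len,key) maximum by a recursive
-- dedup-by-first-occurrence with nested scans (best key found by one scan of the remainder,
-- then that group's duplicates are filtered out and the rest processed recursively);
-- equal return value (both Pythons also mutate d's value sets in place when intersect is
-- given — return values only are compared here, and B performs the same mutation).

-- shared tiny helpers (both Pythons use them literally):
-- set equality v1 == v2 (frozenset(v1) == frozenset(v2)): equality of the element lists as finite sets
def pvSetEq (a b : List (List String)) : Bool :=
  a.all (fun x => b.contains x) && b.all (fun x => a.contains x)

-- Python tuple-of-str `<` (lexicographic, shorter prefix is smaller); exact on ASCII strings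
def pvTokLt : List String → List String → Bool
  | _, [] => false
  | [], _ :: _ => true
  | a :: as, b :: bs => if a < b then true else if b < a then false else pvTokLt as bs

-- `val = len(k), k`
def pvVal (k : List String) : Int × List String := ((k.length : Int), k)

-- Python `<` on (len, key) pairs
def pvValLt (x y : Int × List String) : Bool :=
  if x.1 < y.1 then true else if y.1 < x.1 then false else pvTokLt x.2 y.2

-- d[k] (key always present when the ports call it; getD [] is unreachable)
def pvDictGet (d : List (List String × List (List String))) (k : List String) : List (List String) :=
  ((d.find? (fun kv => kv.1 == k)).map (fun kv => kv.2)).getD []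

-- ===== PORT A =====
-- `if setdefault(key, val) < val: tmp[key] = val` on the association list tmp
-- (dict: first matching key keeps its slot and original key object, value overwritten; absent key appended)
def pvUpd (key : List (List String)) (val : Int × List String) :
    List (List (List String) × (Int × List String)) → List (List (List String) × (Int × List String))
  | [] => [(key, val)]
  | e :: es =>
    if pvSetEq e.1 key then (if pvValLt e.2 val then (e.1, val) else e) :: es
    else e :: pvUpd key val es

def filter_affix_py (d : List (List String × List (List String))) (intersect : Option (List (List String))) : List (List String × List (List String)) :=
  -- stream: d.items(), or _intersect_affix(d, intersect) (v.intersection_update(r) on every value)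
  let d' : List (List String × List (List String)) := match intersect with
    | none => d
    | some r => d.map (fun kv => (kv.1, kv.2.filter (fun t => r.contains t)))
  let tmp := d'.foldl
    (fun tmp kv => if 1 < kv.2.length then pvUpd kv.2 (pvVal kv.1) tmp else tmp)
    ([] : List (List (List String) × (Int × List String)))
  tmp.map (fun e => (e.2.2, pvDictGet d' e.2.2))

-- ===== PORT B =====
-- best = k; for k2, w in rest: if w == v and (len(best), best) < (len(k2), k2): best = k2
def pvBest (k : List String) (v : List (List String))
    (rest : List (List String × List (List String))) : List String :=
  rest.foldl (fun best kv =>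
    if pvSetEq kv.2 v && pvValLt (pvVal best) (pvVal kv.1) then kv.1 else best) k

-- def go(rest): head group's best key, then recurse on rest with that group filtered out
def pvGo (d' : List (List String × List (List String))) :
    List (List String × List (List String)) → List (List String × List (List String))
  | [] => []
  | (k, v) :: rest =>
      (pvBest k v rest, pvDictGet d' (pvBest k v rest)) ::
      pvGo d' (rest.filter (fun it => !pvSetEq it.2 v))
termination_by l => l.length
decreasing_by
  simp only [List.length_cons, List.length_unattach]
  exact Nat.lt_succ_of_le (le_trans (List.length_filter_le _ _) (by rw [List.length_attach]))

def filter_affix_py_alt (d : List (List String × List (List String))) (intersect : Option (List (List String))) : List (List String × List (List String)) :=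
  -- mutation pass: v.intersection_update(intersect) on every value
  let d' : List (List String × List (List String)) := match intersect with
    | none => d
    | some r => d.map (fun kv => (kv.1, kv.2.filter (fun t => r.contains t)))
  -- go([(k, v) for k, v in d.items() if len(v) > 1])
  pvGo d' (d'.filter (fun kv => 1 < kv.2.length))

-- ===== PRECONDITION & SPEC =====
-- Pre_ only excludes association lists that are not valid encodings of a Python dict of sets under the type
-- convention (duplicate keys, or duplicate elements in a value set / in intersect); every actual Python input
-- has a Pre_-satisfying encoding, and A returns normally on all of them.
def Pre_filter_affix_py (d : List (List String × List (List String))) (intersect : Option (List (List String))) : Prop :=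
  (d.map Prod.fst).Nodup ∧ (∀ kv ∈ d, kv.2.Nodup) ∧ (∀ r ∈ intersect.toList, r.Nodup)
instance (d : List (List String × List (List String))) (intersect : Option (List (List String))) : Decidable (Pre_filter_affix_py d intersect) := by unfold Pre_filter_affix_py; infer_instance

def pvWitness_filter_affix_py : (List (List String × List (List String))) × Option (List (List String)) :=
  ([(["a", "b"], [["x"], ["y"]]), (["a"], [["y"], ["x"]])], none)

def Spec_filter_affix_py (d : List (List String × List (List String))) (intersect : Option (List (List String))) (out : List (List String × List (List String))) : Prop := out = filter_affix_py_alt d intersect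
instance (d : List (List String × List (List String))) (intersect : Option (List (List String))) (out : List (List String × List (List String))) : Decidable (Spec_filter_affix_py d intersect out) := by unfold Spec_filter_affix_py; infer_instance

-- ===== CLAIM (what is proved, stated in full; the proofs are below) =====
def Claim_equal_filter_affix_py : Prop := ∀ (d : List (List String × List (List String))) (intersect : Option (List (List String))), Dom_filter_affix_py d intersect → Pre_filter_affix_py d intersect → Spec_filter_affix_py d intersect (filter_affix_py d intersect)

-- ===== LEMMAS AND PROOFS =====

-- pvSetEq is an equivalence
theorem pvSetEq_iff (a b : List (List String)) :
    pvSetEq a b = true ↔ (∀ x ∈ a, x ∈ b) ∧ (∀ x ∈ b, x ∈ a) := by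
  simp [pvSetEq, List.all_eq_true]

theorem pvSetEq_symm (a b : List (List String)) : pvSetEq a b = pvSetEq b a := by
  simp only [pvSetEq]; exact Bool.and_comm _ _

theorem pvSetEq_trans {a b c : List (List String)}
    (h1 : pvSetEq a b = true) (h2 : pvSetEq b c = true) : pvSetEq a c = true := by
  rw [pvSetEq_iff] at *
  exact ⟨fun x hx => (h2.1 x (h1.1 x hx)), fun x hx => h1.2 x (h2.2 x hx)⟩

-- A's fold step
def pvStep (tmp : List (List (List String) × (Int × List String)))
    (kv : List String × List (List String)) :
    List (List (List String) × (Int × List String)) :=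
  pvUpd kv.2 (pvVal kv.1) tmp

-- entry updated by folding the remaining stream
def pvUpdE (l : List (List String × List (List String)))
    (e : List (List String) × (Int × List String)) :
    List (List String) × (Int × List String) :=
  (e.1, l.foldl (fun m kv =>
    if pvSetEq e.1 kv.2 then (if pvValLt m (pvVal kv.1) then pvVal kv.1 else m) else m) e.2)

-- single-entry update
def pvUpdIf (key : List (List String)) (val : Int × List String)
    (e : List (List String) × (Int × List String)) :
    List (List String) × (Int × List String) :=
  if pvSetEq e.1 key then (e.1, if pvValLt e.2 val then val else e.2) else e

def pvNoM (acc : List (List (List String) × (Int × List String)))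
    (kv : List String × List (List String)) : Bool :=
  acc.all (fun e => !pvSetEq e.1 kv.2)

-- foldl over an if-guarded step = foldl over the filtered list
theorem pv_foldl_if {α β : Type} (f : β → α → β) (p : α → Bool) :
    ∀ (l : List α) (init : β),
      l.foldl (fun acc x => if p x then f acc x else acc) init = (l.filter p).foldl f init := by
  intro l
  induction l with
  | nil => intro init; rfl
  | cons x l ih =>
    intro init
    by_cases h : p x = true
    · simp [List.filter_cons, h, ih]
    · simp only [Bool.not_eq_true] at h
      simp [List.filter_cons, h, ih]

-- no-op elements can be filtered out of a fold
theorem pv_foldl_noop {α β : Type} (f : β → α → β) (p : α → Bool)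
    (l : List α) (hl : ∀ y ∈ l, p y = false → ∀ m, f m y = m) :
    ∀ init : β, l.foldl f init = (l.filter p).foldl f init := by
  induction l with
  | nil => intro init; rfl
  | cons x l ih =>
    intro init
    by_cases h : p x = true
    · simp [List.filter_cons, h, ih (fun y hy => hl y (List.mem_cons_of_mem _ hy))]
    · simp only [Bool.not_eq_true] at h
      simp [List.filter_cons, h, hl x (List.mem_cons_self) h,
        ih (fun y hy => hl y (List.mem_cons_of_mem _ hy))]

-- pvUpd when no entry matches: append
theorem pvUpd_no_match (key : List (List String)) (val : Int × List String) :
    ∀ acc, (∀ e ∈ acc, pvSetEq e.1 key = false) →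
      pvUpd key val acc = acc ++ [(key, val)] := by
  intro acc
  induction acc with
  | nil => intro _; rfl
  | cons e es ih =>
    intro h
    have h0 : pvSetEq e.1 key = false := h e List.mem_cons_self
    simp only [pvUpd, h0, Bool.false_eq_true, if_false,
      ih (fun e' he' => h e' (List.mem_cons_of_mem _ he')), List.cons_append]

-- pvUpd when some entry matches and keys are pairwise distinct: pointwise map
theorem pvUpd_match (key : List (List String)) (val : Int × List String) :
    ∀ acc, acc.Pairwise (fun a b => pvSetEq a.1 b.1 = false) →
      acc.any (fun e => pvSetEq e.1 key) = true →
      pvUpd key val acc = acc.map (pvUpdIf key val) := by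
  intro acc
  induction acc with
  | nil => intro _ h; simp at h
  | cons e es ih =>
    intro hp hany
    rcases List.pairwise_cons.mp hp with ⟨he, hes⟩
    by_cases h : pvSetEq e.1 key = true
    · have hrest : ∀ e' ∈ es, pvSetEq e'.1 key = false := by
        intro e' he'
        by_contra hc
        simp only [Bool.not_eq_false] at hc
        have : pvSetEq e.1 e'.1 = true :=
          pvSetEq_trans h (by rw [pvSetEq_symm]; exact hc)
        rw [he e' he'] at this; exact Bool.false_ne_true this
      have hmap : es.map (pvUpdIf key val) = es := by
        calc es.map (pvUpdIf key val) = es.map id :=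
              List.map_congr_left (fun e' he' => by simp [pvUpdIf, hrest e' he'])
          _ = es := List.map_id _
      simp only [pvUpd, h, if_true, List.map_cons, pvUpdIf, hmap]
      by_cases h2 : pvValLt e.2 val = true
      · simp [h2]
      · simp only [Bool.not_eq_true] at h2; simp [h2]
    · simp only [Bool.not_eq_true] at h
      have hany' : es.any (fun e => pvSetEq e.1 key) = true := by
        simp only [List.any_cons, h] at hany
        simpa using hany
      simp [pvUpd, h, pvUpdIf, ih hes hany']

-- the big characterisation of A's fold
theorem pv_lemL : ∀ (n : Nat) (l acc : List _), l.length ≤ n →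
    acc.Pairwise (fun a b => pvSetEq a.1 b.1 = false) →
    l.foldl pvStep acc = acc.map (pvUpdE l) ++ (l.filter (pvNoM acc)).foldl pvStep [] := by
  intro n
  induction n with
  | zero =>
    intro l acc hl _
    have : l = [] := List.length_eq_zero_iff.mp (Nat.le_zero.mp hl)
    subst this
    have : acc.map (pvUpdE []) = acc.map id := List.map_congr_left (fun e _ => rfl)
    simp [this]
  | succ n ih =>
    intro l acc hl hp
    cases l with
    | nil =>
      have : acc.map (pvUpdE []) = acc.map id := List.map_congr_left (fun e _ => rfl)
      simp [this]
    | cons kv l =>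
      have hl' : l.length ≤ n := Nat.le_of_succ_le_succ hl
      simp only [List.foldl_cons]
      by_cases h : pvNoM acc kv = true
      · -- no entry matches kv: appended
        have hnom : ∀ e ∈ acc, pvSetEq e.1 kv.2 = false := by
          intro e he
          have := List.all_eq_true.mp h e he
          simpa using this
        have hstep : pvStep acc kv = acc ++ [(kv.2, pvVal kv.1)] :=
          pvUpd_no_match _ _ _ hnom
        have hp' : (acc ++ [(kv.2, pvVal kv.1)]).Pairwise (fun a b => pvSetEq a.1 b.1 = false) := by
          rw [List.pairwise_append]
          exact ⟨hp, List.pairwise_singleton _ _, by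
            intro a ha b hb
            simp only [List.mem_singleton] at hb
            subst hb
            exact hnom a ha⟩
        rw [hstep, ih l _ hl' hp']
        -- RHS side
        have hkv : pvNoM acc kv = true := h
        rw [List.filter_cons, if_pos hkv]
        have hstep0 : pvStep [] kv = [(kv.2, pvVal kv.1)] := rfl
        rw [List.foldl_cons, hstep0,
          ih (l.filter (pvNoM acc)) [(kv.2, pvVal kv.1)]
            (Nat.le_trans (List.length_filter_le _ _) hl')
            (List.pairwise_singleton _ _)]
        -- match the three pieces
        have ha : acc.map (pvUpdE l) = acc.map (pvUpdE (kv :: l)) := by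
          apply List.map_congr_left
          intro e he
          simp [pvUpdE, hnom e he]
        have hside : ∀ y ∈ l, pvNoM acc y = false →
            ∀ m : Int × List String,
              (if pvSetEq kv.2 y.2 then (if pvValLt m (pvVal y.1) then pvVal y.1 else m) else m) = m := by
          intro y hy hny m
          have hex : ∃ e ∈ acc, pvSetEq e.1 y.2 = true := by
            simp only [pvNoM, List.all_eq_false, Bool.not_eq_true'] at hny
            rcases hny with ⟨e, he, hee⟩
            exact ⟨e, he, by simpa using hee⟩
          have hfalse : pvSetEq kv.2 y.2 = false := by
            by_contra hc
            simp only [Bool.not_eq_false] at hc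
            rcases hex with ⟨e, he, hee⟩
            have : pvSetEq e.1 kv.2 = true :=
              pvSetEq_trans hee (by rw [pvSetEq_symm]; exact hc)
            rw [hnom e he] at this; exact Bool.false_ne_true this
          simp [hfalse]
        have hb : pvUpdE l (kv.2, pvVal kv.1)
            = pvUpdE (l.filter (pvNoM acc)) (kv.2, pvVal kv.1) := by
          simp only [pvUpdE]
          rw [pv_foldl_noop _ (pvNoM acc) l hside]
        have hc : l.filter (pvNoM (acc ++ [(kv.2, pvVal kv.1)]))
            = (l.filter (pvNoM acc)).filter (pvNoM [(kv.2, pvVal kv.1)]) := by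
          rw [List.filter_filter]
          apply List.filter_congr
          intro y _
          simp [pvNoM, List.all_append, Bool.and_comm]
        rw [List.map_append, hc, ha]
        simp only [List.map_cons, List.map_nil]
        rw [hb]
        simp [List.append_assoc]
      · -- some entry matches kv: pointwise update
        have hany : acc.any (fun e => pvSetEq e.1 kv.2) = true := by
          simp only [pvNoM, List.all_eq_true, Bool.not_eq_true'] at h
          push_neg at h
          rcases h with ⟨e, he, hee⟩
          exact List.any_eq_true.mpr ⟨e, he, by simpa using hee⟩
        have hstep : pvStep acc kv = acc.map (pvUpdIf kv.2 (pvVal kv.1)) :=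
          pvUpd_match _ _ _ hp hany
        have hkey : ∀ e, (pvUpdIf kv.2 (pvVal kv.1) e).1 = e.1 := by
          intro e
          simp only [pvUpdIf]
          split_ifs <;> rfl
        have hp' : (acc.map (pvUpdIf kv.2 (pvVal kv.1))).Pairwise
            (fun a b => pvSetEq a.1 b.1 = false) := by
          rw [List.pairwise_map]
          exact hp.imp (by intro a b hab; rw [hkey, hkey]; exact hab)
        rw [hstep, ih l _ hl' hp']
        have hnomeq : l.filter (pvNoM (acc.map (pvUpdIf kv.2 (pvVal kv.1)))) = l.filter (pvNoM acc) := by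
          apply List.filter_congr
          intro y _
          simp only [pvNoM, List.all_map]
          have hfun : ((fun e => !pvSetEq e.1 y.2) ∘ pvUpdIf kv.2 (pvVal kv.1))
              = (fun e => !pvSetEq e.1 y.2) := by
            funext e
            simp [Function.comp, hkey e]
          rw [hfun]
        have hmm : (acc.map (pvUpdIf kv.2 (pvVal kv.1))).map (pvUpdE l)
            = acc.map (pvUpdE (kv :: l)) := by
          rw [List.map_map]
          apply List.map_congr_left
          intro e _
          simp only [Function.comp, pvUpdE, pvUpdIf, List.foldl_cons]
          by_cases hc : pvSetEq e.1 kv.2 = true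
          · simp [hc]
          · simp only [Bool.not_eq_true] at hc
            simp [hc]
        have hfilt : (kv :: l).filter (pvNoM acc) = l.filter (pvNoM acc) := by
          rw [List.filter_cons, if_neg (by simp [h])]
        rw [hnomeq, hmm, hfilt]

-- A's running max value equals pvVal of B's best key
theorem pv_val_best (v : List (List String)) :
    ∀ (l : List (List String × List (List String))) (b : List String),
      l.foldl (fun m kv =>
          if pvSetEq v kv.2 then (if pvValLt m (pvVal kv.1) then pvVal kv.1 else m) else m)
        (pvVal b)
      = pvVal (l.foldl (fun best kv =>
          if pvSetEq kv.2 v && pvValLt (pvVal best) (pvVal kv.1) then kv.1 else best) b) := by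
  intro l
  induction l with
  | nil => intro b; rfl
  | cons kv l ih =>
    intro b
    simp only [List.foldl_cons]
    by_cases hc : pvSetEq kv.2 v = true
    · have hc' : pvSetEq v kv.2 = true := by rw [pvSetEq_symm]; exact hc
      by_cases h2 : pvValLt (pvVal b) (pvVal kv.1) = true
      · simp [hc, hc', h2, ih]
      · simp only [Bool.not_eq_true] at h2
        simp [hc, hc', h2, ih]
    · simp only [Bool.not_eq_true] at hc
      have hc' : pvSetEq v kv.2 = false := by rw [pvSetEq_symm]; exact hc
      simp [hc, hc', ih]

-- main lemma: A's fold-then-map equals B's recursion, for any dictionary d'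
theorem pv_lemM (d' : List (List String × List (List String))) :
    ∀ (n : Nat) (items : List (List String × List (List String))), items.length ≤ n →
      ((items.foldl pvStep []).map (fun e => (e.2.2, pvDictGet d' e.2.2))) = pvGo d' items := by
  intro n
  induction n with
  | zero =>
    intro items hl
    have : items = [] := List.length_eq_zero_iff.mp (Nat.le_zero.mp hl)
    subst this; simp [pvGo]
  | succ n ih =>
    intro items hl
    cases items with
    | nil => simp [pvGo]
    | cons kv l =>
      have hl' : l.length ≤ n := Nat.le_of_succ_le_succ hl
      obtain ⟨k, v⟩ := kv
      simp only [List.foldl_cons]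
      have hstep0 : pvStep [] (k, v) = [(v, pvVal k)] := rfl
      rw [hstep0, pv_lemL n l [(v, pvVal k)] hl' (List.pairwise_singleton _ _)]
      have hval : (pvUpdE l (v, pvVal k)).2 = pvVal (pvBest k v l) := by
        simp only [pvUpdE, pvBest]
        exact pv_val_best v l k
      have hfilt : l.filter (pvNoM [(v, pvVal k)]) = l.filter (fun it => !pvSetEq it.2 v) := by
        apply List.filter_congr
        intro y _
        simp [pvNoM, pvSetEq_symm v y.2]
      simp only [List.map_cons, List.map_append, List.map_nil, List.nil_append, hfilt,
        List.map_cons, List.singleton_append]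
      rw [pvGo]
      congr 1
      · rw [hval]
        simp [pvVal]
      · exact ih (l.filter (fun it => !pvSetEq it.2 v))
          (Nat.le_trans (List.length_filter_le _ _) hl')

-- ===== VERDICT (by name: the statement is the Claim_ definition above) =====
theorem filter_affix_py_spec : Claim_equal_filter_affix_py := by
  intro d intersect _ _
  unfold Spec_filter_affix_py
  have key : ∀ dd : List (List String × List (List String)),
      ((dd.foldl (fun tmp kv => if 1 < kv.2.length then pvUpd kv.2 (pvVal kv.1) tmp else tmp)
          ([] : List (List (List String) × (Int × List String)))).map
        (fun e => (e.2.2, pvDictGet dd e.2.2)))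
      = pvGo dd (dd.filter (fun kv => 1 < kv.2.length)) := by
    intro dd
    have h1 : dd.foldl (fun tmp kv => if 1 < kv.2.length then pvUpd kv.2 (pvVal kv.1) tmp else tmp)
        ([] : List (List (List String) × (Int × List String)))
        = (dd.filter (fun kv => 1 < kv.2.length)).foldl pvStep [] := by
      have := pv_foldl_if pvStep (fun kv => decide (1 < kv.2.length)) dd []
      simpa [pvStep] using this
    rw [h1]
    exact pv_lemM dd (dd.filter (fun kv => 1 < kv.2.length)).length _ (Nat.le_refl _)
  cases intersect with
  | none => exact key d
  | some r => exact key (d.map (fun kv => (kv.1, kv.2.filter (fun t => r.contains t))))
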